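-- pv_equiv track=rewrite | github.com/athnasia/LCC-Simulation-Platform | backend/app/services/costing_service.py | _build_node_route_map
-- ===== SOURCE A (Python) =====
-- from typing import Any
--
-- def _build_node_route_map(
--
--     routes: list[dict[str, Any]]
-- ) -> dict[int, list[int]]:
--     """
--     构建 BOM 节点到路线 ID 的映射
--
--     Args:
--         routes: 路线列表
--
--     Returns:
--         dict: {bom_node_id: [route_id, ...]}
--     """
--     node_route_map: dict[int, list[int]] = {}
--
--     for route in routes:
--         bom_node_id = route["bom_node_id"]
--         route_id = route["route_id"]
--
--         if bom_node_id not in node_route_map: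
--             node_route_map[bom_node_id] = []
--         node_route_map[bom_node_id].append(route_id)
--
--     return node_route_map
-- ===== SOURCE B (Python) =====
-- def _build_node_route_map(routes):
--     """Group route IDs by BOM node ID: distinct-keys pass, then one comprehension per key."""
--     keys = []
--     for route in routes:
--         k = route["bom_node_id"]
--         if k not in keys:
--             keys.append(k)
--     return {k: [r["route_id"] for r in routes if r["bom_node_id"] == k] for k in keys}
-- ===== Notes on version B (the rewrite author's own statement) =====
-- stated objective: alternative
-- what changed: Replaces the single-pass dict-and-append accumulation with a two-phase grouping: collect the distinct bom_node_ids in first-occurrence order, then build each group's route_id list by a filtered scan over the whole route list.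
import Mathlib
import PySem

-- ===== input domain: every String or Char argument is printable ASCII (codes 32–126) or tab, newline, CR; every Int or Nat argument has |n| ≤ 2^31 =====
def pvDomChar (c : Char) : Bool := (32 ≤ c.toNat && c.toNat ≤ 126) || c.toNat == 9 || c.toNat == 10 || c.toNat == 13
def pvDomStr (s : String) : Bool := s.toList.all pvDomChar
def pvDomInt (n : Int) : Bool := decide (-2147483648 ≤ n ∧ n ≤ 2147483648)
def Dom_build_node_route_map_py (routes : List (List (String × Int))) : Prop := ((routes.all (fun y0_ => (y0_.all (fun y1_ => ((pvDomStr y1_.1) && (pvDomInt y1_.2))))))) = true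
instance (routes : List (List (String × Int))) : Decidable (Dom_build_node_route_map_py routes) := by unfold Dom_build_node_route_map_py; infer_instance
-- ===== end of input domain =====

-- B groups the route ids by a distinct-keys pass followed by a filtered scan per key,
-- instead of A's single-pass dict accumulation; same return value (alternative, not faster).

-- ===== PORT A =====
-- route["bom_node_id"] / route["route_id"]; Pre_ guarantees the key is present, so getD 0 is exact there
def pvGetKey (route : List (String × Int)) : Int :=
  ((PySem.Dict.mk route).get? "bom_node_id").getD 0
def pvGetRid (route : List (String × Int)) : Int :=
  ((PySem.Dict.mk route).get? "route_id").getD 0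

def build_node_route_map_py (routes : List (List (String × Int))) : List (Int × List Int) :=
  (routes.foldl (fun m route =>
      let b := pvGetKey route
      let rid := pvGetRid route
      -- if bom_node_id not in node_route_map: node_route_map[bom_node_id] = []
      let m' := if m.contains b then m else m.insert b ([] : List Int)
      -- node_route_map[bom_node_id].append(route_id)  (key present, so default [] unused)
      m'.modify b [] (· ++ [rid]))
    (PySem.Dict.empty : PySem.Dict Int (List Int))).items

-- ===== PORT B =====
def build_node_route_map_py_alt (routes : List (List (String × Int))) : List (Int × List Int) :=
  let keys : PySem.Set Int :=
    routes.foldl (fun ks route => PySem.Set.add ks (pvGetKey route)) PySem.Set.empty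
  keys.map (fun k =>
    (k, (routes.filter (fun r => pvGetKey r == k)).map (fun r => pvGetRid r)))

-- ===== PRECONDITION & SPEC =====
-- Pre_ excludes exactly the inputs on which A raises KeyError: some route lacking
-- the "bom_node_id" or "route_id" key (B raises KeyError on those same inputs).
def Pre_build_node_route_map_py (routes : List (List (String × Int))) : Prop :=
  ∀ r ∈ routes, ((PySem.Dict.mk r).get? "bom_node_id").isSome = true ∧
                ((PySem.Dict.mk r).get? "route_id").isSome = true
instance (routes : List (List (String × Int))) : Decidable (Pre_build_node_route_map_py routes) := by unfold Pre_build_node_route_map_py; infer_instance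

def pvWitness_build_node_route_map_py : (List (List (String × Int))) :=
  [[("bom_node_id", 1), ("route_id", 10)], [("bom_node_id", 1), ("route_id", 11)]]

def Spec_build_node_route_map_py (routes : List (List (String × Int))) (out : List (Int × List Int)) : Prop := out = build_node_route_map_py_alt routes
instance (routes : List (List (String × Int))) (out : List (Int × List Int)) : Decidable (Spec_build_node_route_map_py routes out) := by unfold Spec_build_node_route_map_py; infer_instance

-- ===== CLAIM (what is proved, stated in full; the proofs are below) =====
def Claim_equal_build_node_route_map_py : Prop := ∀ (routes : List (List (String × Int))), Dom_build_node_route_map_py routes → Pre_build_node_route_map_py routes → Spec_build_node_route_map_py routes (build_node_route_map_py routes)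

-- ===== LEMMAS AND PROOFS =====


lemma pvGet?_append_self (b : Int) (l : List (Int × List Int)) (hb : ∀ p ∈ l, ¬ p.1 = b) :
    (PySem.Dict.mk (l ++ [(b, ([] : List Int))])).get? b = some [] := by
  induction l with
  | nil => simp [PySem.Dict.get?_mk_cons]
  | cons p t ih =>
    rcases p with ⟨k, v⟩
    rw [List.cons_append, PySem.Dict.get?_mk_cons]
    have hk : ¬ k = b := hb (k, v) (by simp)
    simp only [show (k == b) = false by simpa using hk, Bool.false_eq_true, if_false]
    exact ih (fun q hq => hb q (by simp [hq]))

lemma stepA_eq_modify (m : PySem.Dict Int (List Int)) (b rid : Int) :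
    (let m' := if m.contains b then m else m.insert b ([] : List Int)
     m'.modify b [] (· ++ [rid])) = m.modify b [] (· ++ [rid]) := by
  by_cases h : m.contains b = true
  · simp [h]
  · simp only [Bool.not_eq_true] at h
    have hb : ∀ p ∈ m.items, ¬ p.1 = b := by
      intro p hp hpb
      have : b ∈ m.keys := by
        have : m.keys = m.items.map (·.1) := rfl
        rw [this]; exact List.mem_map.mpr ⟨p, hp, hpb⟩
      rw [← PySem.Dict.contains_iff_mem_keys] at this
      simp [h] at this
    simp only [h, Bool.false_eq_true, if_false]
    apply PySem.Dict.ext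
    have hcon : ({ items := m.items ++ [(b, ([] : List Int))] } : PySem.Dict Int (List Int)).contains b = true := by
      have := pvGet?_append_self b m.items hb
      rw [PySem.Dict.contains_eq_isSome_get?]
      simp at this ⊢
      simp [this]
    have hgd : ({ items := m.items ++ [(b, ([] : List Int))] } : PySem.Dict Int (List Int)).getD b [] = [] := by
      rw [PySem.Dict.getD_eq_get?_getD]
      have := pvGet?_append_self b m.items hb
      simp at this
      simp [this]
    simp only [PySem.Dict.modify, PySem.Dict.insert, h, Bool.false_eq_true, if_false, hcon, if_true, hgd]
    rw [List.map_append, List.map_congr_left (g := id) (fun p hp => by simp [hb p hp]), List.map_id]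
    simp
    have hn : m.get? b = none := by
      have hc := PySem.Dict.contains_eq_isSome_get? (d := m) (k := b)
      rw [h] at hc
      cases hg : m.get? b
      · rfl
      · rw [hg] at hc; simp at hc
    rw [PySem.Dict.getD_eq_get?_getD, hn]
    rfl


lemma foldA_eq (routes : List (List (String × Int))) :
    routes.foldl (fun m route =>
      let b := pvGetKey route
      let rid := pvGetRid route
      let m' := if m.contains b then m else m.insert b ([] : List Int)
      m'.modify b [] (· ++ [rid])) (PySem.Dict.empty : PySem.Dict Int (List Int))
    = (routes.map (fun r => (pvGetKey r, pvGetRid r))).foldl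
        (fun d p => d.modify p.1 [] (· ++ [p.2])) PySem.Dict.empty := by
  rw [List.foldl_map]
  apply PySem.List.foldl_congr_mem
  intro m r _
  exact stepA_eq_modify m (pvGetKey r) (pvGetRid r)

-- ===== VERDICT (by name: the statement is the Claim_ definition above) =====
theorem build_node_route_map_py_spec : Claim_equal_build_node_route_map_py := by
  intro routes _ _
  unfold Spec_build_node_route_map_py build_node_route_map_py build_node_route_map_py_alt
  rw [foldA_eq]
  set l := routes.map (fun r => (pvGetKey r, pvGetRid r)) with hl
  have hkeys : ((l.foldl (fun d p => d.modify p.1 [] (· ++ [p.2])) (PySem.Dict.empty : PySem.Dict Int (List Int))).keys)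
      = PySem.Set.ofList (l.map Prod.fst) := by
    rw [PySem.Dict.keys_foldl_modify_key]
    simp [PySem.Dict.keys_empty, PySem.Set.update_nil_left]
  have hnd : ((l.foldl (fun d p => d.modify p.1 [] (· ++ [p.2])) (PySem.Dict.empty : PySem.Dict Int (List Int))).keys).Nodup := by
    rw [hkeys]; exact PySem.Set.nodup_ofList _
  rw [PySem.Dict.items_eq_map_keys _ hnd ([] : List Int), hkeys]
  have hmapfst : l.map Prod.fst = routes.map pvGetKey := by
    rw [hl, List.map_map]; rfl
  have hkeyfold : (routes.foldl (fun ks route => PySem.Set.add ks (pvGetKey route)) PySem.Set.empty)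
      = PySem.Set.ofList (l.map Prod.fst) := by
    rw [hmapfst, ← PySem.Set.update_nil_left, PySem.Set.update_map_eq_foldl_add]
    rfl
  rw [hkeyfold]
  apply List.map_congr_left
  intro k _
  rw [PySem.Dict.getD_foldl_modify_append]
  rw [PySem.Dict.getD_empty]
  have hf : l.filter (fun p => p.1 == k) = (routes.filter (fun r => pvGetKey r == k)).map (fun r => (pvGetKey r, pvGetRid r)) := by
    rw [hl, List.filter_map]; rfl
  rw [hf, List.map_map]
  rfl
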